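-- pv_equiv track=rewrite | github.com/pkrolkgp/funkcja_Feistela_PyQt5 | funkcja_RSA.py | kodowanie_tekstu_z_dzieleniem
-- ===== SOURCE A (Python) =====
-- def kodowanie_tekstu_z_dzieleniem(tekst):
--     liczba = 0
--     licznikZnakow = -1
--     tabelaLiczb = []
--     for index, znak in enumerate(tekst):
--         licznikZnakow += 1
--         liczba += ord(znak) * (381 ** licznikZnakow)
--         if licznikZnakow >= 100:
--             tabelaLiczb.append(liczba)
--             liczba = 0
--             licznikZnakow = 0
--     tabelaLiczb.append(liczba)
--     return tabelaLiczb
-- ===== SOURCE B (Python) =====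
-- def _wartosc(blok, start):
--     return sum(ord(c) * 381 ** (start + k) for k, c in enumerate(blok))
--
-- def kodowanie_tekstu_z_dzieleniem(tekst):
--     if len(tekst) < 101:
--         return [_wartosc(tekst, 0)]
--     wynik = [_wartosc(tekst[:101], 0)]
--     reszta = tekst[101:]
--     while len(reszta) >= 100:
--         wynik.append(_wartosc(reszta[:100], 1))
--         reszta = reszta[100:]
--     wynik.append(_wartosc(reszta, 1))
--     return wynik
-- ===== Notes on version B (the rewrite author's own statement) =====
-- stated objective: alternative
-- what changed: Replaces A's single stateful loop with a running counter/accumulator by a slice-based block decomposition: the first 101-char block and then 100-char slices are each evaluated by a self-contained polynomial sum, reproducing exactly A's block layout (later blocks start at exponent 1 because of A's counter reset).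
import Mathlib
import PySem

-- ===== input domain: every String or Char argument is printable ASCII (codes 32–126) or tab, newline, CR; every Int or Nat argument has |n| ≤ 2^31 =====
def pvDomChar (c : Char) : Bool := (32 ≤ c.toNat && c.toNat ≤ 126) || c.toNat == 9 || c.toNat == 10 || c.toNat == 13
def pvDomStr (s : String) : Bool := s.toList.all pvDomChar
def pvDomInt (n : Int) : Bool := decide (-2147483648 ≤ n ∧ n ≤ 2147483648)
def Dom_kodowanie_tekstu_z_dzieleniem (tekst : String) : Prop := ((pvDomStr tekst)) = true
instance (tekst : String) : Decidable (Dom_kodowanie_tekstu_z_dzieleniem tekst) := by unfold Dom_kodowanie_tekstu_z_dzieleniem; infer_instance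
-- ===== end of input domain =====

-- B replaces A's single stateful loop (running counter + accumulator) by a slice-based
-- block decomposition evaluating each block's polynomial independently; same cost, no speed claim.


-- ===== PORT A =====
-- A's loop: counter starts at -1, is incremented before use, flushes at ≥ 100 and resets to 0.
def loopA : List Char → Int → Int → List Int → List Int
  | [], liczba, _, tabelaLiczb => tabelaLiczb ++ [liczba]
  | znak :: cs, liczba, licznikZnakow, tabelaLiczb =>
    let licznik' := licznikZnakow + 1
    let liczba' := liczba + (znak.toNat : Int) * 381 ^ licznik'.toNat
    if licznik' ≥ 100 then loopA cs 0 0 (tabelaLiczb ++ [liczba'])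
    else loopA cs liczba' licznik' tabelaLiczb

def kodowanie_tekstu_z_dzieleniem (tekst : String) : List Int :=
  loopA tekst.toList 0 (-1) []

-- ===== PORT B =====
-- sum(ord(c) * 381 ** (start + k) for k, c in enumerate(blok))
def wartosc (blok : List Char) (start : Nat) : Int :=
  ((PySem.List.enumerate blok 0).map (fun p => (p.2.toNat : Int) * 381 ^ (start + p.1.toNat))).sum

-- the while-loop over reszta: pop a 100-char slice while one exists, then the remainder
def ogonB (reszta : List Char) : List Int :=
  if _h : 100 ≤ reszta.length then
    wartosc (PySem.List.slice reszta none (some 100)) 1 ::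
      ogonB (PySem.List.slice reszta (some 100) none)
  else [wartosc reszta 1]
termination_by reszta.length
decreasing_by
  rw [PySem.List.slice_from reszta (by norm_num : (0:Int) ≤ 100)]
  simp
  omega

def kodowanie_tekstu_z_dzieleniem_alt (tekst : String) : List Int :=
  let cs := tekst.toList
  if cs.length < 101 then [wartosc cs 0]
  else wartosc (PySem.List.slice cs none (some 101)) 0 ::
         ogonB (PySem.List.slice cs (some 101) none)

-- ===== PRECONDITION & SPEC =====
def Spec_kodowanie_tekstu_z_dzieleniem (tekst : String) (out : List Int) : Prop := out = kodowanie_tekstu_z_dzieleniem_alt tekst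
instance (tekst : String) (out : List Int) : Decidable (Spec_kodowanie_tekstu_z_dzieleniem tekst out) := by unfold Spec_kodowanie_tekstu_z_dzieleniem; infer_instance

-- ===== CLAIM (what is proved, stated in full; the proofs are below) =====
def Claim_equal_kodowanie_tekstu_z_dzieleniem : Prop := ∀ (tekst : String), Dom_kodowanie_tekstu_z_dzieleniem tekst → Spec_kodowanie_tekstu_z_dzieleniem tekst (kodowanie_tekstu_z_dzieleniem tekst)

-- ===== LEMMAS AND PROOFS =====

-- structural restatement of the per-block polynomial
def poly : List Char → Nat → Int
  | [], _ => 0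
  | c :: cs, e => (c.toNat : Int) * 381 ^ e + poly cs (e + 1)

theorem wartosc_eq_poly_gen (cs : List Char) : ∀ (e s : Nat),
    ((PySem.List.enumerate cs (s : Int)).map
      (fun p => (p.2.toNat : Int) * 381 ^ (e + p.1.toNat))).sum = poly cs (e + s) := by
  induction cs with
  | nil => intro e s; simp [PySem.List.enumerate, poly]
  | cons c cs ih =>
    intro e s
    rw [PySem.List.enumerate_cons]
    simp only [List.map_cons, List.sum_cons]
    have h1 : ((s : Int) + 1) = ((s + 1 : Nat) : Int) := by push_cast; ring
    rw [h1, ih e (s + 1)]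
    have h2 : ((s : Int)).toNat = s := Int.toNat_natCast s
    have h3 : e + (s + 1) = e + s + 1 := by omega
    rw [h3]
    simp [poly, h2]

theorem wartosc_eq_poly (cs : List Char) (e : Nat) : wartosc cs e = poly cs e := by
  have := wartosc_eq_poly_gen cs e 0
  simpa [wartosc] using this

theorem loopA_gen (cs : List Char) : ∀ (e : Nat) (liczba : Int) (tab : List Int), e ≤ 100 →
    loopA cs liczba ((e : Int) - 1) tab =
      if cs.length + e ≤ 100 then tab ++ [liczba + poly cs e]
      else loopA (cs.drop (101 - e)) 0 0 (tab ++ [liczba + poly (cs.take (101 - e)) e]) := by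
  induction cs with
  | nil =>
    intro e liczba tab he
    rw [if_pos (show ([] : List Char).length + e ≤ 100 by simpa using he)]
    simp [loopA, poly]
  | cons c cs ih =>
    intro e liczba tab he
    have hstep : (e : Int) - 1 + 1 = (e : Int) := by ring
    simp only [loopA, hstep]
    by_cases h100 : e = 100
    · subst h100
      rw [if_pos (show (((100 : Nat) : Int)) ≥ 100 by norm_num)]
      rw [if_neg (show ¬ ((c :: cs).length + 100 ≤ 100) by simp)]
      have h101 : (101 : Nat) - 100 = 1 := by norm_num
      rw [h101]
      simp [poly]
    · have hlt : e < 100 := by omega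
      rw [if_neg (show ¬ (((e : Nat) : Int) ≥ 100) by
        intro hge
        have : (100 : Nat) ≤ e := by exact_mod_cast hge
        omega)]
      have h1 : (e : Int) = ((e + 1 : Nat) : Int) - 1 := by push_cast; ring
      rw [h1, ih (e + 1) _ tab (by omega)]
      have he' : ((e : Int)).toNat = e := Int.toNat_natCast e
      by_cases hlen : cs.length + (e + 1) ≤ 100
      · rw [if_pos hlen, if_pos (by simp; omega)]
        simp [poly, he']
        ring
      · rw [if_neg hlen, if_neg (by simp; omega)]
        have hd : (101 : Nat) - (e + 1) = 100 - e := by omega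
        have hd2 : (c :: cs).drop (101 - e) = cs.drop (100 - e) := by
          have : 101 - e = (100 - e) + 1 := by omega
          simp [this]
        have ht : (c :: cs).take (101 - e) = c :: cs.take (100 - e) := by
          have : 101 - e = (100 - e) + 1 := by omega
          simp [this]
        rw [hd, hd2, ht]
        simp [poly, he']
        ring_nf

theorem slice_from_100 (xs : List Char) :
    PySem.List.slice xs (some 100) none = xs.drop 100 := by
  rw [PySem.List.slice_from xs (by norm_num : (0:Int) ≤ 100)]
  rw [show Int.toNat 100 = 100 from rfl]

theorem ogon_loop (rest : List Char) : ∀ (tab : List Int),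
    loopA rest 0 0 tab = tab ++ ogonB rest := by
  induction hn : rest.length using Nat.strong_induction_on generalizing rest with
  | _ n ih =>
    intro tab
    have h := loopA_gen rest 1 0 tab (by omega)
    rw [show ((1 : Nat) : Int) - 1 = 0 by norm_num] at h
    rw [show (101 : Nat) - 1 = 100 by norm_num] at h
    rw [h]
    by_cases hlen : rest.length + 1 ≤ 100
    · rw [if_pos hlen]
      conv_rhs => rw [ogonB]
      rw [dif_neg (by omega)]
      simp [wartosc_eq_poly]
    · rw [if_neg hlen]
      subst hn
      rw [ih (rest.drop 100).length (by simp; omega) (rest.drop 100) rfl]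
      conv_rhs => rw [ogonB]
      rw [dif_pos (show 100 ≤ rest.length by omega)]
      rw [slice_from_100, PySem.List.slice_to rest (by norm_num : (0:Int) ≤ 100)]
      rw [show Int.toNat 100 = 100 from rfl]
      rw [wartosc_eq_poly]
      simp

theorem slice_pair_101 (xs : List Char) :
    PySem.List.slice xs none (some 101) = xs.take 101 ∧
    PySem.List.slice xs (some 101) none = xs.drop 101 := by
  constructor
  · rw [PySem.List.slice_to xs (by norm_num : (0:Int) ≤ 101)]
    rw [show Int.toNat 101 = 101 from rfl]
  · rw [PySem.List.slice_from xs (by norm_num : (0:Int) ≤ 101)]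
    rw [show Int.toNat 101 = 101 from rfl]

-- ===== VERDICT (by name: the statement is the Claim_ definition above) =====
theorem kodowanie_tekstu_z_dzieleniem_spec : Claim_equal_kodowanie_tekstu_z_dzieleniem := by
  intro tekst _
  unfold Spec_kodowanie_tekstu_z_dzieleniem kodowanie_tekstu_z_dzieleniem kodowanie_tekstu_z_dzieleniem_alt
  set cs := tekst.toList with hcs
  have h := loopA_gen cs 0 0 [] (by omega)
  rw [show ((0 : Nat) : Int) - 1 = -1 by norm_num] at h
  rw [h]
  by_cases hlen : cs.length < 101
  · rw [if_pos (by omega), if_pos hlen]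
    simp [wartosc_eq_poly]
  · rw [if_neg (by omega), if_neg hlen]
    rw [ogon_loop]
    rw [(slice_pair_101 cs).1, (slice_pair_101 cs).2]
    simp [wartosc_eq_poly]
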